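-- pv_equiv track=rewrite | github.com/Ashiq-am/Path-of-Python | 3.Data Types/Arrays Set 1 and Set 2/Prefix Sum/Substrings starting with vowel and ending with consonants and vice versa/Substrings starting with vowel and ending with consonants and vice versa.py | countSpecial
-- ===== SOURCE A (Python) =====
-- def isVowel(ch):
--     return (ch == 'a' or ch == 'e' or
--             ch == 'i' or ch == 'o' or
--             ch == 'u')
--
-- def isCons(ch):
--     return (ch != 'a' and ch != 'e' and
--             ch != 'i' and ch != 'o' and
--             ch != 'u')
--
-- def countSpecial(str):
--     lent = len(str)
--
--     # co[i] is going to store counts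
--     # of consonants from str[len-1]
--     # to str[i].
--     # vo[i] is going to store counts
--     # of vowels from str[len-1]
--     # to str[i].
--     co = []
--     vo = []
--
--     for i in range(0, lent + 1):
--         co.append(0)
--
--     for i in range(0, lent + 1):
--         vo.append(0)
--
--     # Counting consonants and vowels
--     # from end of string.
--     if isCons(str[lent - 1]) == 1:
--         co[lent - 1] = 1
--     else:
--         vo[lent - 1] = 1
--
--     for i in range(lent - 2, -1, -1):
--
--         if isCons(str[i]) == 1:
--             co[i] = co[i + 1] + 1
--             vo[i] = vo[i + 1]
--
--         else:
--             co[i] = co[i + 1]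
--             vo[i] = vo[i + 1] + 1
--
--     # Now we traverse string from beginning
--     ans = 0
--
--     for i in range(lent):
--
--         # If vowel, then count of substrings
--         # starting with str[i] is equal to
--         # count of consonants after it.
--         if isVowel(str[i]):
--             ans = ans + co[i + 1]
--
--         # If consonant, then count of
--         # substrings starting with str[i]
--         # is equal to count of vowels
--         # after it.
--         else:
--             ans = ans + vo[i + 1]
--
--     return ans
-- ===== SOURCE B (Python) =====
-- def countSpecial(str):
--     v = sum(1 for ch in str if ch in 'aeiou')
--     return v * (len(str) - v)
-- ===== Notes on version B (the rewrite author's own statement) =====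
-- stated objective: simpler
-- what changed: Replaces A's two suffix-count arrays plus three fill loops and a final scan by a single pass counting vowels v and returning v*(len-v), since each special substring corresponds to exactly one (vowel position, consonant position) pair.
-- outside the precondition, e.g. on countSpecial(''): A raises IndexError, B returns 0
import Mathlib
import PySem

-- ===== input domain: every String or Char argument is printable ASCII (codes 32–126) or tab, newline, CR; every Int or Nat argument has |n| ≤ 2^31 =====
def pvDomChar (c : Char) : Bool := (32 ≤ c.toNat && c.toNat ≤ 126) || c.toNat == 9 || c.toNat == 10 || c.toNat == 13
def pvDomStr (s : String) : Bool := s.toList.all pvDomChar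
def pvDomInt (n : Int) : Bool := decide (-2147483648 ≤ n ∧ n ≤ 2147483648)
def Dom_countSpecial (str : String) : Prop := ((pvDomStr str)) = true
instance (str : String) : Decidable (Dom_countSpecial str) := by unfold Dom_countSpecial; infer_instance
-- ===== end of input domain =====

-- B replaces A's two suffix-count arrays (three fill loops + a final scan) by a single pass
-- counting vowels v and returning v*(len-v): each special substring is one (vowel, consonant) pair.

-- ===== PORT A =====
def isVowelA (ch : Char) : Bool :=
  ch == 'a' || ch == 'e' || ch == 'i' || ch == 'o' || ch == 'u'

def isConsA (ch : Char) : Bool :=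
  ch != 'a' && ch != 'e' && ch != 'i' && ch != 'o' && ch != 'u'

-- body of A's backward fill loop (one iteration at index i)
def fillStep (chars : List Char) (st : List Int × List Int) (i : Int) : List Int × List Int :=
  match PySem.List.pyGet? chars i with
  | none => st   -- unreachable: i is always in range
  | some ch =>
    let n := i.toNat
    if isConsA ch then
      (st.1.set n (st.1.getD (n + 1) 0 + 1), st.2.set n (st.2.getD (n + 1) 0))
    else
      (st.1.set n (st.1.getD (n + 1) 0), st.2.set n (st.2.getD (n + 1) 0 + 1))

-- body of A's final counting loop (one iteration at index i)
def ansStep (chars : List Char) (co vo : List Int) (ans : Int) (i : Int) : Int :=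
  match PySem.List.pyGet? chars i with
  | none => ans   -- unreachable: i is always in range
  | some ch =>
    if isVowelA ch then ans + co.getD (i.toNat + 1) 0
    else ans + vo.getD (i.toNat + 1) 0

def countSpecial (str : String) : Int :=
  let chars := str.toList
  let lent : Int := chars.length
  let co : List Int := (PySem.List.pyRange 0 (lent + 1) 1).foldl (fun acc _ => acc ++ [0]) []
  let vo : List Int := (PySem.List.pyRange 0 (lent + 1) 1).foldl (fun acc _ => acc ++ [0]) []
  match PySem.List.pyGet? chars (lent - 1) with
  | none => 0   -- Python raises IndexError here (empty string); excluded by Pre_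
  | some last =>
    let st :=
      if isConsA last then (co.set (lent - 1).toNat 1, vo)
      else (co, vo.set (lent - 1).toNat 1)
    let st := (PySem.List.pyRange (lent - 2) (-1) (-1)).foldl (fillStep chars) st
    (PySem.List.pyRange 0 lent 1).foldl (ansStep chars st.1 st.2) 0

-- ===== PORT B =====
def countSpecial_alt (str : String) : Int :=
  let v : Int := ((str.toList.filter (fun ch => ch ∈ ['a', 'e', 'i', 'o', 'u'])).length : Int)
  v * ((str.toList.length : Int) - v)

-- ===== PRECONDITION & SPEC =====
-- A indexes str[lent-1] before any counting, so it raises IndexError on the empty string.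
def Pre_countSpecial (str : String) : Prop := str ≠ ""
instance (str : String) : Decidable (Pre_countSpecial str) := by unfold Pre_countSpecial; infer_instance
def pvWitness_countSpecial : String := "abc"

def Spec_countSpecial (str : String) (out : Int) : Prop := out = countSpecial_alt str
instance (str : String) (out : Int) : Decidable (Spec_countSpecial str out) := by unfold Spec_countSpecial; infer_instance

-- ===== CLAIM (what is proved, stated in full; the proofs are below) =====
def Claim_equal_countSpecial : Prop := ∀ (str : String), Dom_countSpecial str → Pre_countSpecial str → Spec_countSpecial str (countSpecial str)

-- ===== LEMMAS AND PROOFS =====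

-- vowel / consonant counts of a character list, as integers
def vc (l : List Char) : Int := ((l.filter isVowelA).length : Int)
def cc (l : List Char) : Int := ((l.filter isConsA).length : Int)

theorem isConsA_eq_not (ch : Char) : isConsA ch = !isVowelA ch := by
  simp [isConsA, isVowelA, bne]

theorem vc_add_cc (l : List Char) : vc l + cc l = l.length := by
  induction l with
  | nil => simp [cc, vc]
  | cons c t ih =>
    simp only [cc, vc, List.filter_cons] at *
    rw [isConsA_eq_not]
    cases h : isVowelA c <;> simp [h] at * <;> omega

-- the two zero-append loops build a list of zeros
theorem zeros_loop (r : List Int) (init : List Int) :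
    r.foldl (fun acc _ => acc ++ [(0 : Int)]) init = init ++ List.replicate r.length 0 := by
  induction r generalizing init with
  | nil => simp
  | cons a t ih => simp [List.foldl, ih, List.replicate_succ]

theorem getD_set_self (xs : List Int) (i : Nat) (x : Int) (h : i < xs.length) :
    (xs.set i x).getD i 0 = x := by
  simp [List.getD_eq_getElem?_getD, h]

theorem getD_set_ne (xs : List Int) (i j : Nat) (x : Int) (h : i ≠ j) :
    (xs.set i x).getD j 0 = xs.getD j 0 := by
  simp [List.getD_eq_getElem?_getD, List.getElem?_set_ne, h]

theorem getD_replicate_zero (m j : Nat) : (List.replicate m (0 : Int)).getD j 0 = 0 := by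
  simp [List.getD_eq_getElem?_getD, List.getElem?_replicate]
  split <;> rfl

theorem drop_cons_count (l : List Char) (k : Nat) (h : k < l.length) :
    cc (l.drop k) = (if isConsA l[k] then 1 else 0) + cc (l.drop (k + 1)) ∧
    vc (l.drop k) = (if isVowelA l[k] then 1 else 0) + vc (l.drop (k + 1)) := by
  rw [List.drop_eq_getElem_cons h]
  constructor <;> simp only [cc, vc, List.filter_cons] <;> split <;> simp <;> push_cast <;> ring

-- invariant of the backward fill: suffix counts are correct from position k on
def Good (l : List Char) (k : Nat) (co vo : List Int) : Prop :=
  co.length = l.length + 1 ∧ vo.length = l.length + 1 ∧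
  ∀ j : Nat, k ≤ j → co.getD j 0 = cc (l.drop j) ∧ vo.getD j 0 = vc (l.drop j)

theorem good_step (l : List Char) (k : Nat) (co vo : List Int)
    (hk : k < l.length) (h : Good l (k + 1) co vo) :
    Good l k ((fillStep l (co, vo) k).1) ((fillStep l (co, vo) k).2) := by
  obtain ⟨hco, hvo, hgood⟩ := h
  have hget : PySem.List.pyGet? l (k : Int) = some l[k] := by
    simp [PySem.List.pyGet?_natCast, List.getElem?_eq_getElem hk]
  have htn : ((k : Int)).toNat = k := by omega
  have hck : co.getD (k + 1) 0 = cc (l.drop (k + 1)) := (hgood (k + 1) le_rfl).1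
  have hvk : vo.getD (k + 1) 0 = vc (l.drop (k + 1)) := (hgood (k + 1) le_rfl).2
  obtain ⟨hdc, hdv⟩ := drop_cons_count l k hk
  simp only [fillStep, hget, htn]
  split
  case isTrue hcons =>
    refine ⟨by simp [hco], by simp [hvo], fun j hj => ?_⟩
    rcases eq_or_lt_of_le hj with he | hl
    · subst he
      constructor
      · rw [getD_set_self _ _ _ (by omega), hck, hdc, if_pos hcons]; ring
      · rw [getD_set_self _ _ _ (by omega), hvk, hdv]
        have : isVowelA l[k] = false := by
          revert hcons; simp [isConsA, isVowelA, bne]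
        rw [this]; simp
    · rw [getD_set_ne _ _ _ _ (by omega), getD_set_ne _ _ _ _ (by omega)]
      exact hgood j (by omega)
  case isFalse hcons =>
    refine ⟨by simp [hco], by simp [hvo], fun j hj => ?_⟩
    rcases eq_or_lt_of_le hj with he | hl
    · subst he
      constructor
      · rw [getD_set_self _ _ _ (by omega), hck, hdc, if_neg hcons]; ring
      · rw [getD_set_self _ _ _ (by omega), hvk, hdv]
        have : isVowelA l[k] = true := by
          revert hcons; simp [isConsA, isVowelA, bne]; tauto
        rw [this]; simp; ring
    · rw [getD_set_ne _ _ _ _ (by omega), getD_set_ne _ _ _ _ (by omega)]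
      exact hgood j (by omega)

theorem fill_good (l : List Char) :
    ∀ (k : Nat) (co vo : List Int), k ≤ l.length → Good l k co vo →
    Good l 0 (((PySem.List.pyRange ((k : Int) - 1) (-1) (-1)).foldl (fillStep l) (co, vo)).1)
             (((PySem.List.pyRange ((k : Int) - 1) (-1) (-1)).foldl (fillStep l) (co, vo)).2) := by
  intro k
  induction k with
  | zero =>
    intro co vo _ h
    rw [PySem.List.pyRange_neg_one_eq_nil (by omega)]
    simpa using h
  | succ k ih =>
    intro co vo hk h
    have he : ((k + 1 : Nat) : Int) - 1 = (k : Int) := by push_cast; ring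
    rw [he, PySem.List.pyRange_neg_one_cons (by omega)]
    simp only [List.foldl_cons]
    have hg := good_step l k co vo (by omega) h
    have hpair : fillStep l (co, vo) (k : Int) =
        ((fillStep l (co, vo) (k : Int)).1, (fillStep l (co, vo) (k : Int)).2) := rfl
    rw [hpair]
    exact ih _ _ (by omega) hg

theorem key_sum (l : List Char) :
    (∑ k ∈ Finset.range l.length,
      (if isVowelA (l.getD k ' ') then cc (l.drop (k + 1)) else vc (l.drop (k + 1)))) =
    vc l * cc l := by
  induction l with
  | nil => simp [vc, cc]
  | cons c t ih =>
    rw [List.length_cons, Finset.sum_range_succ']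
    simp only [List.getD_cons_succ, List.drop_succ_cons, List.getD_cons_zero] at *
    rw [ih]
    have hvc : vc (c :: t) = (if isVowelA c then 1 else 0) + vc t := by
      simp only [vc, List.filter_cons]; split <;> simp <;> push_cast <;> ring
    have hcc : cc (c :: t) = (if isConsA c then 1 else 0) + cc t := by
      simp only [cc, List.filter_cons]; split <;> simp <;> push_cast <;> ring
    rw [hvc, hcc, isConsA_eq_not]
    cases h : isVowelA c <;> simp [h] <;> ring

theorem foldl_range_add (g : Nat → Int) : ∀ (m : Nat) (a : Int),
    (List.range m).foldl (fun acc k => acc + g k) a = a + ∑ k ∈ Finset.range m, g k := by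
  intro m
  induction m with
  | zero => simp
  | succ m ih => intro a; rw [List.range_succ, Finset.sum_range_succ]; simp [ih]; ring

theorem ans_fold (l : List Char) (co vo : List Int)
    (h : ∀ j : Nat, co.getD j 0 = cc (l.drop j) ∧ vo.getD j 0 = vc (l.drop j)) :
    (PySem.List.pyRange 0 (l.length : Int) 1).foldl (ansStep l co vo) 0 = vc l * cc l := by
  rw [PySem.List.pyRange_zero_natCast, List.foldl_map]
  have hcongr : (List.range l.length).foldl (fun a (k : Nat) => ansStep l co vo a (k : Int)) 0 =
      (List.range l.length).foldl (fun a (k : Nat) =>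
        a + (if isVowelA (l.getD k ' ') then cc (l.drop (k + 1)) else vc (l.drop (k + 1)))) 0 := by
    apply PySem.List.foldl_congr_mem
    intro a k hkmem
    have hk : k < l.length := List.mem_range.mp hkmem
    have hget : PySem.List.pyGet? l ((k : Nat) : Int) = some l[k] := by
      simp [PySem.List.pyGet?_natCast, List.getElem?_eq_getElem hk]
    have hgd : l.getD k ' ' = l[k] := by
      simp [List.getD_eq_getElem?_getD, List.getElem?_eq_getElem hk]
    have htn : (((k : Nat) : Int)).toNat = k := by omega
    simp only [ansStep, hget, hgd, htn, (h (k + 1)).1, (h (k + 1)).2]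
    split <;> rfl
  rw [hcongr, foldl_range_add, zero_add, key_sum]

theorem alt_eq (str : String) : countSpecial_alt str = vc str.toList * cc str.toList := by
  unfold countSpecial_alt
  have hfilter : str.toList.filter (fun ch => ch ∈ ['a', 'e', 'i', 'o', 'u']) =
      str.toList.filter isVowelA := by
    apply List.filter_congr
    intro ch _
    simp [isVowelA, Bool.beq_eq_decide_eq, Bool.or_assoc]
  rw [hfilter]
  have h1 := vc_add_cc str.toList
  have h2 : cc str.toList =
      ((str.toList.length : Int)) - ((str.toList.filter isVowelA).length : Int) := by
    simp only [vc] at h1; omega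
  rw [h2]
  rfl

theorem main_eq (str : String) (hpre : str ≠ "") : countSpecial str = countSpecial_alt str := by
  rw [alt_eq]
  have hne : str.toList ≠ [] := by
    intro h; exact hpre (by simpa using h)
  have hn : 0 < str.toList.length := List.length_pos_of_ne_nil hne
  unfold countSpecial
  have hz : (PySem.List.pyRange 0 ((str.toList.length : Int) + 1) 1).foldl
      (fun acc _ => acc ++ [(0 : Int)]) [] = List.replicate (str.toList.length + 1) 0 := by
    have hL : (PySem.List.pyRange 0 ((str.toList.length : Int) + 1) 1).length
        = str.toList.length + 1 := by
      rw [PySem.List.length_pyRange_one]; omega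
    rw [zeros_loop, hL, List.nil_append]
  have hprev : str.toList.length - 1 < str.toList.length := by omega
  have hidx : ((str.toList.length : Int)) - 1 = ((str.toList.length - 1 : Nat) : Int) := by omega
  have hlast : PySem.List.pyGet? str.toList ((str.toList.length : Int) - 1)
      = some (str.toList[str.toList.length - 1]'hprev) := by
    rw [hidx]; simp [PySem.List.pyGet?_natCast, List.getElem?_eq_getElem hprev]
  have htn : (((str.toList.length : Int)) - 1).toNat = str.toList.length - 1 := by omega
  have hrange : ((str.toList.length : Int)) - 2 = ((str.toList.length - 1 : Nat) : Int) - 1 := by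
    omega
  simp only [hz, hlast, htn, hrange]
  -- the initial arrays satisfy the invariant from position length-1 on
  have hdropnil : str.toList.drop str.toList.length = [] := List.drop_length
  have hEmptyAt : ∀ j : Nat, str.toList.length - 1 < j → str.toList.drop j = [] := by
    intro j hj; exact List.drop_eq_nil_of_le (by omega)
  obtain ⟨hdc, hdv⟩ := drop_cons_count str.toList (str.toList.length - 1) hprev
  have hstep : str.toList.length - 1 + 1 = str.toList.length := by omega
  rw [hstep] at hdc hdv
  have hinit : Good str.toList (str.toList.length - 1)
      (if isConsA (str.toList[str.toList.length - 1]'hprev) then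
        ((List.replicate (str.toList.length + 1) (0 : Int)).set (str.toList.length - 1) 1,
         List.replicate (str.toList.length + 1) (0 : Int))
      else
        (List.replicate (str.toList.length + 1) (0 : Int),
         (List.replicate (str.toList.length + 1) (0 : Int)).set (str.toList.length - 1) 1)).1
      (if isConsA (str.toList[str.toList.length - 1]'hprev) then
        ((List.replicate (str.toList.length + 1) (0 : Int)).set (str.toList.length - 1) 1,
         List.replicate (str.toList.length + 1) (0 : Int))
      else
        (List.replicate (str.toList.length + 1) (0 : Int),
         (List.replicate (str.toList.length + 1) (0 : Int)).set (str.toList.length - 1) 1)).2 := by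
    split
    case isTrue hcons =>
      refine ⟨by simp, by simp, fun j hj => ?_⟩
      rcases eq_or_lt_of_le hj with he | hl
      · subst he
        constructor
        · rw [getD_set_self _ _ _ (by simp only [List.length_replicate]; omega), hdc, hdropnil, if_pos hcons]
          simp [cc]
        · rw [getD_replicate_zero, hdv, hdropnil]
          have : isVowelA (str.toList[str.toList.length - 1]'hprev) = false := by
            revert hcons; simp [isConsA, isVowelA, bne]
          rw [this]; simp [vc]
      · rw [getD_set_ne _ _ _ _ (by omega), getD_replicate_zero, hEmptyAt j hl]
        simp [cc, vc]
    case isFalse hcons =>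
      refine ⟨by simp, by simp, fun j hj => ?_⟩
      rcases eq_or_lt_of_le hj with he | hl
      · subst he
        constructor
        · rw [getD_replicate_zero, hdc, hdropnil, if_neg hcons]
          simp [cc]
        · rw [getD_set_self _ _ _ (by simp only [List.length_replicate]; omega), hdv, hdropnil]
          have : isVowelA (str.toList[str.toList.length - 1]'hprev) = true := by
            revert hcons; simp [isConsA, isVowelA, bne]; tauto
          rw [this]; simp [vc]
      · rw [getD_set_ne _ _ _ _ (by omega), getD_replicate_zero, hEmptyAt j hl]
        simp [cc, vc]
  have hGood := fill_good str.toList (str.toList.length - 1) _ _ (by omega) hinit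
  exact ans_fold str.toList _ _ (fun j => (hGood.2.2 j (Nat.zero_le j)))

-- ===== VERDICT (by name: the statement is the Claim_ definition above) =====
theorem countSpecial_spec : Claim_equal_countSpecial := by
  intro str _ hpre
  unfold Spec_countSpecial
  exact main_eq str hpre
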